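-- pv_equiv track=rewrite | github.com/Anupal/codility | 6_NumberOfDiskIntersections.py | solution
-- ===== SOURCE A (Python) =====
-- def solution(A):
--     def binary_search(x, target):
--         """
--         finds index of x[i][0] which is <= target
--         """
--         i, j = 0, len(x)
--         while i < j:
--             m = (i + j) // 2
--             if x[m][0] <= target:
--                 i = m + 1
--             else:
--                 j = m
--
--         return i
--
--     n = len(A)
--     disks = [(i - A[i], i + A[i]) for i in range(n)]
--     disks.sort()
--
--     pairs = 0
--     for i in range(n):
--         count = binary_search(disks, disks[i][1])
--         count -= i + 1
--         pairs += count
--         if pairs > 10_000_000: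
--             return -1
--
--     return pairs
-- ===== SOURCE B (Python) =====
-- def solution(A):
--     n = len(A)
--     disks = sorted((i - A[i], i + A[i]) for i in range(n))
--     lowers = [d[0] for d in disks]
--     order = sorted(range(n), key=lambda t: disks[t][1])
--     cnt = [0] * n
--     j = 0
--     for t in order:
--         u = disks[t][1]
--         while j < n and lowers[j] <= u:
--             j += 1
--         cnt[t] = j
--     pairs = 0
--     for i in range(n):
--         pairs += cnt[i] - i - 1
--         if pairs > 10_000_000:
--             return -1
--     return pairs
-- ===== Notes on version B (the rewrite author's own statement) =====
-- stated objective: alternative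
-- what changed: Replaces A's per-disk binary search over the lex-sorted (lower,upper) pairs by a single linear two-pointer merge: the counts for all disks are computed in one sweep over the upper endpoints taken in sorted order (via a rank ordering) and then accumulated in the same order as A with the same 10M early-exit sentinel.
import Mathlib
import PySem

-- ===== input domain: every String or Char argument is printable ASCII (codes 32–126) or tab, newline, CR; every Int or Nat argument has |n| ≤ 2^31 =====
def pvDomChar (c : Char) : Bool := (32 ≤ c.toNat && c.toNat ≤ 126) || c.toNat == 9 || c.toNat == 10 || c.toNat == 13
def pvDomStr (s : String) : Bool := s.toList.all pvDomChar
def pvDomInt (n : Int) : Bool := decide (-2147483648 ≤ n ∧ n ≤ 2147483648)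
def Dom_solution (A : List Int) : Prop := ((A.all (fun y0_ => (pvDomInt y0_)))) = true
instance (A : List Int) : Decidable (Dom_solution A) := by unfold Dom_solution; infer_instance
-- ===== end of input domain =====

-- B replaces A's per-disk binary search over lex-sorted (lower, upper) pairs by a single
-- two-pointer merge over two separately sorted scalar endpoint arrays (objective: alternative).

-- ===== PORT A =====
-- inner `while i < j` of binary_search; x[m] is always in range, so getD is exact here
def pvBsGo (x : List (Int × Int)) (target : Int) (i j : Nat) : Nat :=
  if _h : i < j then
    if (x.getD ((i + j) / 2) (0, 0)).1 ≤ target then pvBsGo x target ((i + j) / 2 + 1) j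
    else pvBsGo x target i ((i + j) / 2)
  else i
termination_by j - i
decreasing_by all_goals omega

-- disks = [(i - A[i], i + A[i]) for i in range(n)]; i < len(A), so getD is exact here
def pvDisks (A : List Int) : List (Int × Int) :=
  (List.range A.length).map (fun (i : Nat) => ((i : Int) - A.getD i 0, (i : Int) + A.getD i 0))

-- `for i in range(n)` loop with the early `return -1`
def pvALoop (D : List (Int × Int)) (n i : Nat) (pairs : Int) : Int :=
  if _h : i < n then
    let count : Int := ((pvBsGo D (D.getD i (0, 0)).2 0 D.length : Nat) : Int) - ((i : Int) + 1)
    let pairs' := pairs + count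
    if pairs' > 10000000 then -1 else pvALoop D n (i + 1) pairs'
  else pairs
termination_by n - i

def solution (A : List Int) : Int :=
  let disks := PySem.List.sorted2 (pvDisks A) Prod.fst Prod.snd
  pvALoop disks A.length 0 0

-- ===== PORT B =====
-- inner `while j < n and lowers[j] <= u`: lows is lowers[j:], so the j < n test is the match
def pvAdvance (lows : List Int) (u : Int) (j : Nat) : Nat × List Int :=
  match lows with
  | [] => (j, [])
  | l :: rest => if l ≤ u then pvAdvance rest u (j + 1) else (j, l :: rest)

-- `for t in order:` filling cnt[t] = j by the two-pointer merge
def pvFill (disks : List (Int × Int)) (lows : List Int) (cnt : List Nat) (order : List Nat)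
    (j : Nat) : List Nat :=
  match order with
  | [] => cnt
  | t :: rest =>
    let s := pvAdvance lows (disks.getD t (0, 0)).2 j
    pvFill disks s.2 (cnt.set t s.1) rest s.1

-- `for i in range(n)` accumulation loop with the early `return -1`
def pvBLoop (cnt : List Nat) (n i : Nat) (pairs : Int) : Int :=
  if _h : i < n then
    let pairs' := pairs + ((cnt.getD i 0 : Nat) : Int) - ((i : Int) + 1)
    if pairs' > 10000000 then -1 else pvBLoop cnt n (i + 1) pairs'
  else pairs
termination_by n - i

def solution_alt (A : List Int) : Int :=
  let disks := PySem.List.sorted2 (pvDisks A) Prod.fst Prod.snd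
  let lows := disks.map Prod.fst
  let order := PySem.List.sorted (List.range A.length) (fun t => (disks.getD t (0, 0)).2)
  let cnt := pvFill disks lows (List.replicate A.length 0) order 0
  pvBLoop cnt A.length 0 0

-- ===== PRECONDITION & SPEC =====
def Spec_solution (A : List Int) (out : Int) : Prop := out = solution_alt A
instance (A : List Int) (out : Int) : Decidable (Spec_solution A out) := by unfold Spec_solution; infer_instance

-- ===== CLAIM (what is proved, stated in full; the proofs are below) =====
def Claim_equal_solution : Prop := ∀ (A : List Int), Dom_solution A → Spec_solution A (solution A)

-- ===== LEMMAS AND PROOFS =====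

-- generic count-boundary lemmas
theorem pv_le_countP {α : Type} (p : α → Bool) (L : List α) (r : Nat) (hr : r ≤ L.length)
    (h1 : ∀ k (h : k < L.length), k < r → p L[k] = true) : r ≤ L.countP p := by
  have hsplit : L.countP p = (L.take r).countP p + (L.drop r).countP p := by
    rw [← List.countP_append, List.take_append_drop]
  have htake : (L.take r).countP p = r := by
    have hall : ∀ a ∈ L.take r, p a = true := by
      intro a ha
      obtain ⟨k, hk, hEq⟩ := List.mem_iff_getElem.mp ha
      have hk2 : k < L.length := by simp [List.length_take] at hk; omega
      have hkr : k < r := by simp [List.length_take] at hk; omega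
      have : a = L[k] := by rw [← hEq]; exact List.getElem_take
      rw [this]; exact h1 k hk2 hkr
    rw [List.countP_eq_length.mpr hall, List.length_take]; omega
  omega

theorem pv_countP_le {α : Type} (p : α → Bool) (L : List α) (r : Nat)
    (h2 : ∀ k (h : k < L.length), r ≤ k → p L[k] = false) : L.countP p ≤ r := by
  have hsplit : L.countP p = (L.take r).countP p + (L.drop r).countP p := by
    rw [← List.countP_append, List.take_append_drop]
  have hdrop : (L.drop r).countP p = 0 := by
    rw [List.countP_eq_zero]
    intro a ha
    obtain ⟨k, hk, hEq⟩ := List.mem_iff_getElem.mp ha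
    have hk2 : r + k < L.length := by simp [List.length_drop] at hk; omega
    have : a = L[r + k] := by rw [← hEq]; exact List.getElem_drop
    rw [this]; simp [h2 (r + k) hk2 (by omega)]
  have htake : (L.take r).countP p ≤ r := (List.countP_le_length).trans (by simp)
  omega

theorem pv_countP_of_le_of_gt {α : Type} (p : α → Bool) (L : List α) (r : Nat) (hr : r ≤ L.length)
    (h1 : ∀ k (h : k < L.length), k < r → p L[k] = true)
    (h2 : ∀ k (h : k < L.length), r ≤ k → p L[k] = false) : L.countP p = r :=
  le_antisymm (pv_countP_le p L r h2) (pv_le_countP p L r hr h1)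

-- A's tuple sort is the sort by the lexicographic key
theorem pv_sorted2_eq_sorted_lex (xs : List (Int × Int)) :
    PySem.List.sorted2 xs Prod.fst Prod.snd =
      PySem.List.sorted xs (fun p => (toLex p : Lex (Int × Int))) := by
  rw [PySem.List.sorted_eq_foldl_insertBy]
  unfold PySem.List.sorted2
  simp only [if_neg, Bool.false_eq_true, not_false_iff]
  have hb : (fun (a b : Int × Int) =>
      (decide (a.1 < b.1) || (!decide (b.1 < a.1) && decide (a.2 < b.2))))
      = fun (a b : Int × Int) => decide ((toLex a : Lex (Int × Int)) < toLex b) := by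
    funext a b
    have : ((toLex a : Lex (Int × Int)) < toLex b) ↔ (a.1 < b.1 ∨ (a.1 = b.1 ∧ a.2 < b.2)) := by
      simpa using Prod.Lex.lt_iff (x := toLex a) (y := toLex b)
    by_cases h1 : a.1 < b.1 <;> by_cases h2 : b.1 < a.1 <;> by_cases h3 : a.2 < b.2 <;>
      simp [h1, h2, h3, this] <;> omega
  rw [hb]

-- A's binary search: boundary invariant of the while loop
theorem pv_bsGo_boundary (x : List (Int × Int)) (t : Int)
    (hmono : ∀ p q (hp : p < x.length) (hq : q < x.length), p ≤ q → x[p].1 ≤ x[q].1) :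
    ∀ (d i j : Nat), j - i = d → i ≤ j → j ≤ x.length →
    (∀ k (h : k < x.length), k < i → x[k].1 ≤ t) →
    (∀ k (h : k < x.length), j ≤ k → t < x[k].1) →
    (pvBsGo x t i j ≤ x.length ∧
      (∀ k (h : k < x.length), k < pvBsGo x t i j → x[k].1 ≤ t) ∧
      (∀ k (h : k < x.length), pvBsGo x t i j ≤ k → t < x[k].1)) := by
  intro d
  induction d using Nat.strong_induction_on with
  | _ d ih =>
    intro i j hd hij hjl hlo hhi
    rw [pvBsGo]
    by_cases h : i < j
    · simp only [h, dif_pos]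
      have hm1 : i ≤ (i + j) / 2 := by omega
      have hm2 : (i + j) / 2 < j := by omega
      have hmlen : (i + j) / 2 < x.length := by omega
      rw [List.getD_eq_getElem x (0,0) hmlen]
      by_cases hc : x[(i + j) / 2].1 ≤ t
      · simp only [hc, if_pos]
        exact ih (j - ((i + j) / 2 + 1)) (by omega) ((i + j) / 2 + 1) j rfl (by omega) hjl
          (by
            intro k hk hki
            by_cases hkm : k < (i + j) / 2 + 1
            · calc x[k].1 ≤ x[(i + j) / 2].1 := hmono k ((i + j) / 2) hk hmlen (by omega)
                _ ≤ t := hc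
            · omega) hhi
      · simp only [hc, if_neg, not_false_iff]
        exact ih ((i + j) / 2 - i) (by omega) i ((i + j) / 2) rfl (by omega) (by omega) hlo
          (by
            intro k hk hkm
            exact lt_of_lt_of_le (by omega) (hmono ((i + j) / 2) k hmlen hk hkm))
    · simp only [h, dif_neg, not_false_iff]
      have : i = j := by omega
      exact ⟨by omega, fun k hk hki => hlo k hk (by omega), fun k hk hki => hhi k hk (by omega)⟩

-- A's binary search counts the pairs whose first component is ≤ target
theorem pv_bsGo_countP (x : List (Int × Int)) (t : Int)
    (hmono : ∀ p q (hp : p < x.length) (hq : q < x.length), p ≤ q → x[p].1 ≤ x[q].1) :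
    pvBsGo x t 0 x.length = x.countP (fun d => decide (d.1 ≤ t)) := by
  obtain ⟨hle, h1, h2⟩ := pv_bsGo_boundary x t hmono (x.length - 0) 0 x.length rfl (by omega)
    (le_refl _) (by omega) (by omega)
  symm
  apply pv_countP_of_le_of_gt _ _ _ hle
  · intro k hk hkr; simpa using h1 k hk hkr
  · intro k hk hkr
    have := h2 k hk hkr
    simp only [decide_eq_false_iff_not, not_le]
    omega

-- B's pointer advance reaches the count of lowers ≤ u
theorem pv_advance_spec (Ls : List Int) (u : Int)
    (hs : List.Pairwise (· ≤ ·) Ls) :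
    ∀ lows j, j ≤ Ls.length → lows = Ls.drop j →
      (∀ k (h : k < Ls.length), k < j → Ls[k] ≤ u) →
      pvAdvance lows u j = (Ls.countP (fun l => decide (l ≤ u)),
        Ls.drop (Ls.countP (fun l => decide (l ≤ u)))) := by
  intro lows
  induction lows with
  | nil =>
    intro j hj hdrop hlo
    have hlen : j = Ls.length := by
      have := List.drop_eq_nil_iff.mp hdrop.symm
      omega
    have hc : Ls.countP (fun l => decide (l ≤ u)) = j := by
      apply pv_countP_of_le_of_gt _ _ _ (by omega)
      · intro k hk hkj; simpa using hlo k hk hkj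
      · intro k hk hkj; omega
    simp [pvAdvance, hc, ← hdrop]
  | cons l rest ih =>
    intro j hj hdrop hlo
    have hjlen : j < Ls.length := by
      by_contra hge
      have : Ls.drop j = [] := List.drop_eq_nil_iff.mpr (by omega)
      rw [← hdrop] at this; simp at this
    have hcons : Ls.drop j = Ls[j] :: Ls.drop (j + 1) := List.drop_eq_getElem_cons hjlen
    rw [hcons] at hdrop
    rw [List.cons_eq_cons] at hdrop
    obtain ⟨hl, hrest⟩ := hdrop
    by_cases hc : l ≤ u
    · rw [pvAdvance]
      simp only [hc, if_pos]
      exact ih (j + 1) (by omega) hrest (by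
        intro k hk hkj
        by_cases hkj' : k < j
        · exact hlo k hk hkj'
        · subst hl
          have hkeq : k = j := by omega
          subst hkeq
          exact hc)
    · have hcnt : Ls.countP (fun l => decide (l ≤ u)) = j := by
        apply pv_countP_of_le_of_gt _ _ _ (le_of_lt hjlen)
        · intro k hk hkj; simpa using hlo k hk hkj
        · intro k hk hkj
          have : Ls[j] ≤ Ls[k] := by
            rcases Nat.lt_or_ge j k with h'|h'
            · exact (List.pairwise_iff_getElem.mp hs) j k hjlen hk h'
            · have : j = k := by omega
              simp [this]
          simp only [decide_eq_false_iff_not, not_le]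
          rw [← hl] at this
          omega
      rw [pvAdvance]
      simp only [hc, if_neg, not_false_iff]
      rw [hcnt, hcons, ← hl, ← hrest]

-- in sorted Ls, every position below the count of (≤ u) holds a value ≤ u
theorem pv_lt_countP_le (Ls : List Int) (hs : List.Pairwise (· ≤ ·) Ls) (u : Int) :
    ∀ k (h : k < Ls.length), k < Ls.countP (fun l => decide (l ≤ u)) → Ls[k] ≤ u := by
  intro k h hk
  by_contra hgt
  have : Ls.countP (fun l => decide (l ≤ u)) ≤ k := by
    apply pv_countP_le
    intro k' h' hk'
    have : Ls[k] ≤ Ls[k'] := by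
      rcases Nat.lt_or_ge k k' with h'' | h''
      · exact (List.pairwise_iff_getElem.mp hs) k k' h h' h''
      · have : k = k' := by omega
        subst this; rfl
    simp only [decide_eq_false_iff_not, not_le]
    omega
  omega

-- B's fill loop leaves cnt[i] = count of lowers ≤ key i, for each i in order
theorem pv_fill_spec (D : List (Int × Int)) (Ls : List Int)
    (hs : List.Pairwise (· ≤ ·) Ls) :
    ∀ (order cnt : List Nat) (j : Nat), j ≤ Ls.length →
      order.Nodup →
      List.Pairwise (fun a b => (D.getD a (0, 0)).2 ≤ (D.getD b (0, 0)).2) order →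
      (∀ t ∈ order, t < cnt.length) →
      (∀ t ∈ order, ∀ k (h : k < Ls.length), k < j → Ls[k] ≤ (D.getD t (0, 0)).2) →
      ∀ i : Nat,
        (pvFill D (Ls.drop j) cnt order j).getD i 0 =
          if i ∈ order then Ls.countP (fun l => decide (l ≤ (D.getD i (0, 0)).2))
          else cnt.getD i 0 := by
  intro order
  induction order with
  | nil => intro cnt j _ _ _ _ _ i; simp [pvFill]
  | cons t rest ih =>
    intro cnt j hj hnd hpair hlen hlo i
    rw [pvFill]
    have hadv := pv_advance_spec Ls (D.getD t (0, 0)).2 hs (Ls.drop j) j hj rfl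
      (fun k h hk => hlo t (by simp) k h hk)
    rw [hadv]
    set cu := Ls.countP (fun l => decide (l ≤ (D.getD t (0, 0)).2)) with hcu
    have hcule : cu ≤ Ls.length := List.countP_le_length
    have hrec := ih (cnt.set t cu) cu hcule hnd.of_cons hpair.of_cons
      (by intro t' ht'; rw [List.length_set]; exact hlen t' (by simp [ht']))
      (by
        intro t' ht' k h hk
        calc Ls[k] ≤ (D.getD t (0, 0)).2 := pv_lt_countP_le Ls hs _ k h (by omega)
          _ ≤ (D.getD t' (0, 0)).2 := List.rel_of_pairwise_cons hpair ht') i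
    rw [hrec]
    by_cases hir : i ∈ rest
    · simp [hir]
    · by_cases hit : i = t
      · subst hit
        have hilen : i < cnt.length := hlen i (by simp)
        have hset : (cnt.set i cu).getD i 0 = cu := by
          rw [List.getD_eq_getElem?_getD, List.getElem?_set_self (by omega), Option.getD_some]
        rw [if_neg hir, hset, if_pos (List.mem_cons_self)]
      · have hmem : ¬ i ∈ t :: rest := by simp [hit, hir]
        have hset : (cnt.set t cu).getD i 0 = cnt.getD i 0 := by
          rw [List.getD_eq_getElem?_getD, List.getElem?_set_ne (by omega),
            List.getD_eq_getElem?_getD]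
        rw [if_neg hir, hset, if_neg hmem]

-- the two accumulation loops agree when the per-index counts agree
theorem pv_loops_congr (D : List (Int × Int)) (cnt : List Nat) (n : Nat)
    (hc : ∀ k, k < n → pvBsGo D (D.getD k (0, 0)).2 0 D.length = cnt.getD k 0) :
    ∀ (d i : Nat) (p : Int), n - i = d → pvALoop D n i p = pvBLoop cnt n i p := by
  intro d
  induction d using Nat.strong_induction_on with
  | _ d ih =>
    intro i p hd
    rw [pvALoop, pvBLoop]
    by_cases h : i < n
    · simp only [h, dif_pos]
      have he : p + (((pvBsGo D (D.getD i (0, 0)).2 0 D.length : Nat) : Int) - ((i : Int) + 1))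
          = p + ((cnt.getD i 0 : Nat) : Int) - ((i : Int) + 1) := by
        rw [hc i h]; ring
      rw [he]
      by_cases hbig : p + ((cnt.getD i 0 : Nat) : Int) - ((i : Int) + 1) > 10000000
      · simp only [hbig, if_pos]
      · simp only [hbig, if_neg, not_false_iff]
        exact ih (n - (i + 1)) (by omega) (i + 1) _ rfl
    · simp only [h, dif_neg, not_false_iff]

-- full assembly
theorem pv_main (A : List Int) : solution A = solution_alt A := by
  unfold solution solution_alt
  rw [pv_sorted2_eq_sorted_lex]
  set D := PySem.List.sorted (pvDisks A) (fun p => (toLex p : Lex (Int × Int))) with hDdef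
  have hDperm : D.Perm (pvDisks A) := PySem.List.sorted_perm _ _ _
  have hDpair : List.Pairwise (fun a b => (toLex a : Lex (Int × Int)) ≤ toLex b) D :=
    PySem.List.sorted_pairwise _ _
  have hDfst : List.Pairwise (fun a b : Int × Int => a.1 ≤ b.1) D := by
    refine hDpair.imp ?_
    intro a b hab
    rcases Prod.Lex.le_iff.mp hab with h | ⟨h, _⟩
    · exact le_of_lt h
    · exact le_of_eq h
  have hmono : ∀ p q (hp : p < D.length) (hq : q < D.length), p ≤ q → D[p].1 ≤ D[q].1 := by
    intro p q hp hq hpq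
    rcases Nat.lt_or_ge p q with h | h
    · exact (List.pairwise_iff_getElem.mp hDfst) p q hp hq h
    · have : p = q := by omega
      subst this; rfl
  have hDlen : D.length = A.length := by
    rw [hDperm.length_eq]; simp [pvDisks]
  have hLpair : List.Pairwise (· ≤ ·) (D.map Prod.fst) := by
    exact List.pairwise_map.mpr hDfst
  set order := PySem.List.sorted (List.range A.length) (fun t => (D.getD t (0, 0)).2) with hOdef
  have hOperm : order.Perm (List.range A.length) := PySem.List.sorted_perm _ _ _
  have hOnodup : order.Nodup := hOperm.nodup_iff.mpr List.nodup_range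
  have hOpair : List.Pairwise (fun a b => (D.getD a (0, 0)).2 ≤ (D.getD b (0, 0)).2) order :=
    PySem.List.sorted_pairwise _ _
  have hOmem : ∀ t : Nat, t ∈ order ↔ t < A.length := by
    intro t
    rw [hOperm.mem_iff, List.mem_range]
  have hfill := pv_fill_spec D (D.map Prod.fst) hLpair order (List.replicate A.length 0) 0
    (by omega) hOnodup hOpair
    (by intro t ht; rw [List.length_replicate]; exact (hOmem t).mp ht)
    (by intro t _ k h hk; omega)
  rw [List.drop_zero] at hfill
  apply pv_loops_congr
  · intro k hk
    have hkD : k < D.length := by omega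
    rw [pv_bsGo_countP D _ hmono, hfill k, if_pos ((hOmem k).mpr hk)]
    rw [List.countP_map]
    rfl
  · rfl

-- ===== VERDICT (by name: the statement is the Claim_ definition above) =====
theorem solution_spec : Claim_equal_solution := by
  intro A _
  unfold Spec_solution
  exact pv_main A
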